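-- pv_equiv track=rewrite | github.com/vitorcezli/parser | chomsky.py | getAllPossibilitiesRemoving
-- ===== SOURCE A (Python) =====
-- import itertools
--
-- def removeDuplicates(listVariable):
-- 	listVariable.sort()
-- 	return list(k for k,_ in itertools.groupby(listVariable))
--
-- def getPossibilitiesWithout(rule, nonterminal):
-- 	possibilities = []
--
-- 	for index in range(len(rule)):
-- 		if rule[index] == nonterminal:
-- 			listCopy = rule[:]
-- 			del listCopy[index]
-- 			if len(listCopy) >= 1:
-- 				possibilities.append(listCopy)
-- 				possibilities += getPossibilitiesWithout(listCopy, nonterminal)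
-- 	return removeDuplicates(possibilities)
--
-- def getAllPossibilitiesRemoving(listOfRules, nonterminal):
-- 	possibilities = []
--
-- 	for rule in listOfRules:
-- 		possibilities.append(rule)
-- 		possibilitiesWithout = getPossibilitiesWithout(rule, nonterminal)
-- 		if possibilitiesWithout != []:
-- 			possibilities += possibilitiesWithout
-- 	return removeDuplicates(possibilities)
-- ===== SOURCE B (Python) =====
-- import itertools
--
-- def getAllPossibilitiesRemoving(listOfRules, nonterminal):
-- 	out = []
-- 	for rule in listOfRules:
-- 		out.append(rule)
-- 		total = rule.count(nonterminal)
-- 		for removed in range(1, total + 1):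
-- 			if len(rule) - removed >= 1:
-- 				out.extend([list(cand)
-- 					for cand in itertools.combinations(rule, len(rule) - removed)
-- 					if cand.count(nonterminal) == total - removed])
-- 	out.sort()
-- 	return [k for k, _ in itertools.groupby(out)]
-- ===== Notes on version B (the rewrite author's own statement) =====
-- stated objective: alternative
-- what changed: A recursively deletes one occurrence at a time in every possible order, sorting and deduplicating at every recursion level; B makes one pass that, per rule, enumerates candidate shorter rules directly with itertools.combinations filtered by a count check, and sorts+dedups once at the end.
import Mathlib
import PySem

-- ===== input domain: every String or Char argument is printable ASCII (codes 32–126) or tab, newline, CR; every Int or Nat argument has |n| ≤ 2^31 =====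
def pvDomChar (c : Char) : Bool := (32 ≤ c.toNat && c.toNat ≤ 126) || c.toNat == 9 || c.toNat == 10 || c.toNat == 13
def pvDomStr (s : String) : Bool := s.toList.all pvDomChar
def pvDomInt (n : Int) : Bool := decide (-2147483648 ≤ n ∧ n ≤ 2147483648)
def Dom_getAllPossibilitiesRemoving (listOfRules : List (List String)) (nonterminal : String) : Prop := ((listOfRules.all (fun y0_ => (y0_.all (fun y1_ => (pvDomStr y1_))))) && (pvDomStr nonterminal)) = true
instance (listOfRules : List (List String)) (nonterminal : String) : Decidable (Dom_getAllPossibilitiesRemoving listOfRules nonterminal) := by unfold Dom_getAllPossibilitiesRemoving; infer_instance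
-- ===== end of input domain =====

-- B replaces A's occurrence-by-occurrence deletion recursion (with a sort+dedup at every level) by
-- a single pass that enumerates candidate shorter rules via itertools.combinations and a count
-- filter, sorting and deduplicating once; same return value (a sorted duplicate-free list).

-- ===== PORT A =====
-- removeDuplicates(listVariable): sort in place, then keep one element per groupby group.
-- (The identical 'sort + groupby' line ends Source B, so both ports share this helper.)
def pvGroupKeys (prev : List String) : List (List String) → List (List String)
  | [] => []
  | y :: ys => if y = prev then pvGroupKeys prev ys else y :: pvGroupKeys y ys

def pvRemoveDuplicates (xs : List (List String)) : List (List String) :=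
  match PySem.List.sorted xs (fun x => x) with
  | [] => []
  | y :: ys => y :: pvGroupKeys y ys

-- getPossibilitiesWithout, with fuel = rule.length (each recursive call is on a list one shorter,
-- so fuel = length makes the Lean recursion terminate while computing exactly what Python computes).
def pvGetPossibilitiesWithout : Nat → List String → String → List (List String)
  | 0, _, _ => []
  | fuel + 1, rule, nonterminal =>
    pvRemoveDuplicates ((List.range rule.length).foldl (fun possibilities index =>
      if rule.getD index "" = nonterminal then
        let listCopy := rule.eraseIdx index
        if 1 ≤ listCopy.length then
          possibilities ++ (listCopy :: pvGetPossibilitiesWithout fuel listCopy nonterminal)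
        else possibilities
      else possibilities) [])

def getAllPossibilitiesRemoving (listOfRules : List (List String)) (nonterminal : String) : List (List String) :=
  pvRemoveDuplicates (listOfRules.foldl (fun possibilities rule =>
    let possibilitiesWithout := pvGetPossibilitiesWithout rule.length rule nonterminal
    if possibilitiesWithout ≠ [] then (possibilities ++ [rule]) ++ possibilitiesWithout
    else possibilities ++ [rule]) [])

-- ===== PORT B =====
def getAllPossibilitiesRemoving_alt (listOfRules : List (List String)) (nonterminal : String) : List (List String) :=
  pvRemoveDuplicates (listOfRules.foldl (fun out rule =>
    let total := PySem.List.count rule nonterminal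
    (PySem.List.pyRange 1 ((total : Int) + 1)).foldl (fun out2 removed =>
      if 1 ≤ (rule.length : Int) - removed then
        out2 ++ (PySem.List.combinations rule ((rule.length : Int) - removed).toNat).filter
          (fun cand => (PySem.List.count cand nonterminal : Int) == (total : Int) - removed)
      else out2) (out ++ [rule])) [])

-- ===== PRECONDITION & SPEC =====
def Spec_getAllPossibilitiesRemoving (listOfRules : List (List String)) (nonterminal : String) (out : List (List String)) : Prop := out = getAllPossibilitiesRemoving_alt listOfRules nonterminal
instance (listOfRules : List (List String)) (nonterminal : String) (out : List (List String)) : Decidable (Spec_getAllPossibilitiesRemoving listOfRules nonterminal out) := by unfold Spec_getAllPossibilitiesRemoving; infer_instance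

-- ===== CLAIM (what is proved, stated in full; the proofs are below) =====
def Claim_equal_getAllPossibilitiesRemoving : Prop := ∀ (listOfRules : List (List String)) (nonterminal : String), Dom_getAllPossibilitiesRemoving listOfRules nonterminal → Spec_getAllPossibilitiesRemoving listOfRules nonterminal (getAllPossibilitiesRemoving listOfRules nonterminal)

-- ===== LEMMAS AND PROOFS =====

-- 'a is rule with some (possibly zero) occurrences of nonterminal deleted'
inductive DelNt (nonterminal : String) : List String → List String → Prop
  | nil : DelNt nonterminal [] []
  | keep (x : String) {r a : List String} : DelNt nonterminal r a → DelNt nonterminal (x :: r) (x :: a)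
  | drop {r a : List String} : DelNt nonterminal r a → DelNt nonterminal (nonterminal :: r) a

theorem delnt_refl (nt : String) (r : List String) : DelNt nt r r := by
  induction r with
  | nil => exact DelNt.nil
  | cons x xs ih => exact DelNt.keep x ih

theorem delnt_sublist {nt : String} {r a : List String} (h : DelNt nt r a) : a.Sublist r := by
  induction h with
  | nil => exact List.Sublist.refl _
  | keep x _ ih => exact ih.cons₂ x
  | drop _ ih => exact ih.cons _

theorem delnt_count {nt : String} {r a : List String} (h : DelNt nt r a) :
    a.count nt + r.length = r.count nt + a.length := by
  induction h with
  | nil => rfl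
  | keep x _ ih => simp only [List.count_cons, List.length_cons]; split <;> omega
  | drop _ ih => simp only [List.count_cons, List.length_cons, BEq.rfl, if_pos]; omega

-- in a sublist, the number of deleted copies of nt is at most the total number of deletions
theorem sublist_count_ge {nt : String} {r a : List String} (h : a.Sublist r) :
    r.count nt + a.length ≤ a.count nt + r.length := by
  induction h with
  | slnil => simp
  | cons b h ih => simp only [List.count_cons, List.length_cons]; split <;> omega
  | cons₂ x h ih => simp only [List.count_cons, List.length_cons]; split <;> omega

theorem delnt_of_sublist_count {nt : String} {r a : List String} (h : a.Sublist r)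
    (hc : a.count nt + r.length = r.count nt + a.length) : DelNt nt r a := by
  induction h with
  | slnil => exact DelNt.nil
  | @cons l₁ l₂ b h ih =>
    have hb : b = nt := by
      by_contra hne
      have := sublist_count_ge (nt := nt) h
      simp only [List.count_cons, List.length_cons] at hc
      rw [if_neg (by simpa using hne)] at hc
      omega
    subst hb
    refine DelNt.drop (ih ?_)
    simp only [List.count_cons, List.length_cons, BEq.rfl, if_pos] at hc
    omega
  | @cons₂ l₁ l₂ x h ih =>
    refine DelNt.keep x (ih ?_)
    simp only [List.count_cons, List.length_cons] at hc
    split at hc <;> omega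

theorem delnt_trans {nt : String} {r c a : List String} (h1 : DelNt nt r c) (h2 : DelNt nt c a) :
    DelNt nt r a := by
  refine delnt_of_sublist_count ((delnt_sublist h2).trans (delnt_sublist h1)) ?_
  have e1 := delnt_count h1
  have e2 := delnt_count h2
  have l1 := (delnt_sublist h1).length_le
  have l2 := (delnt_sublist h2).length_le
  omega

theorem delnt_oneStep {nt : String} (rule : List String) (i : Nat) (hi : i < rule.length)
    (hv : rule.getD i "" = nt) : DelNt nt rule (rule.eraseIdx i) := by
  induction rule generalizing i with
  | nil => simp at hi
  | cons x r ih =>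
    cases i with
    | zero =>
      simp only [List.getD_cons_zero] at hv
      subst hv
      exact DelNt.drop (delnt_refl _ _)
    | succ j =>
      simp only [List.getD_cons_succ] at hv
      simp only [List.length_cons, Nat.succ_lt_succ_iff] at hi
      simpa [List.eraseIdx_cons_succ] using DelNt.keep x (ih j hi hv)

theorem delnt_decomp {nt : String} {rule a : List String} (h : DelNt nt rule a)
    (hlt : a.length < rule.length) :
    ∃ i, i < rule.length ∧ rule.getD i "" = nt ∧ DelNt nt (rule.eraseIdx i) a := by
  induction h with
  | nil => simp at hlt
  | @keep x r b h ih =>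
    have : b.length < r.length := by simpa using hlt
    obtain ⟨i, hi, hv, hd⟩ := ih this
    exact ⟨i + 1, by simpa using hi, by simpa using hv, by
      simpa [List.eraseIdx_cons_succ] using DelNt.keep x hd⟩
  | @drop r b h ih =>
    exact ⟨0, by simp, by simp, by simpa using h⟩

-- sorted_pairwise is stated with the LinearOrder-derived instances; re-expressed with the
-- instances pvRemoveDuplicates elaborates with (they are definitionally equal)
theorem pv_sorted_pairwise (xs : List (List String)) :
    (PySem.List.sorted xs (fun x => x)).Pairwise (· ≤ ·) := by
  have h := PySem.List.sorted_pairwise (κ := List String) xs (fun x => x)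
  convert h using 2

-- sort + groupby-keys: membership, strict sortedness, and extensionality
theorem mem_pvGroupKeys {prev : List String} {l : List (List String)} {a : List String}
    (h : (prev :: l).Pairwise (· ≤ ·)) : a ∈ pvGroupKeys prev l ↔ a ∈ l ∧ a ≠ prev := by
  induction l generalizing prev with
  | nil => simp [pvGroupKeys]
  | cons y ys ih =>
    have hprev : ∀ b ∈ y :: ys, prev ≤ b := (List.pairwise_cons.mp h).1
    have hys : (y :: ys).Pairwise (· ≤ ·) := (List.pairwise_cons.mp h).2
    by_cases hy : y = prev
    · rw [pvGroupKeys, if_pos hy]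
      have h' : (prev :: ys).Pairwise (· ≤ ·) :=
        List.Pairwise.sublist ((List.sublist_cons_self y ys).cons₂ prev) h
      rw [ih h']
      constructor
      · rintro ⟨hm, hne⟩; exact ⟨List.mem_cons_of_mem _ hm, hne⟩
      · rintro ⟨hm, hne⟩
        rcases List.mem_cons.mp hm with rfl | hm
        · exact absurd hy.symm (Ne.symm hne)
        · exact ⟨hm, hne⟩
    · rw [pvGroupKeys, if_neg hy]
      rw [List.mem_cons, ih hys]
      have hne_prev : ∀ b, b ∈ ys → b ≠ prev := by
        intro b hb heq
        have h1 : prev ≤ y := hprev y (by simp)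
        have h2 : y ≤ b := (List.pairwise_cons.mp hys).1 b hb
        exact hy (le_antisymm (heq ▸ h2) h1)
      constructor
      · rintro (rfl | ⟨hm, _⟩)
        · exact ⟨List.mem_cons_self .., fun hc => hy hc⟩
        · exact ⟨List.mem_cons_of_mem _ hm, hne_prev a hm⟩
      · rintro ⟨hm, hne⟩
        rcases List.mem_cons.mp hm with rfl | hm
        · exact Or.inl rfl
        · by_cases hay : a = y
          · exact Or.inl hay
          · exact Or.inr ⟨hm, hay⟩

theorem pairwise_pvGroupKeys {prev : List String} {l : List (List String)}
    (h : (prev :: l).Pairwise (· ≤ ·)) : (prev :: pvGroupKeys prev l).Pairwise (· < ·) := by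
  induction l generalizing prev with
  | nil => simp [pvGroupKeys]
  | cons y ys ih =>
    have hprev : ∀ b ∈ y :: ys, prev ≤ b := (List.pairwise_cons.mp h).1
    have hys : (y :: ys).Pairwise (· ≤ ·) := (List.pairwise_cons.mp h).2
    by_cases hy : y = prev
    · rw [pvGroupKeys, if_pos hy]
      have h' : (prev :: ys).Pairwise (· ≤ ·) :=
        List.Pairwise.sublist ((List.sublist_cons_self y ys).cons₂ prev) h
      exact ih h'
    · rw [pvGroupKeys, if_neg hy]
      have hrest := ih hys
      refine List.pairwise_cons.mpr ⟨?_, hrest⟩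
      intro b hb
      have hprev_y : prev < y := lt_of_le_of_ne (hprev y (by simp)) (fun hc => hy hc.symm)
      rcases List.mem_cons.mp hb with rfl | hb
      · exact hprev_y
      · have hbys : b ∈ ys := ((mem_pvGroupKeys hys).mp hb).1
        exact lt_of_lt_of_le hprev_y ((List.pairwise_cons.mp hys).1 b hbys)

theorem mem_pvRemoveDuplicates (xs : List (List String)) (a : List String) :
    a ∈ pvRemoveDuplicates xs ↔ a ∈ xs := by
  unfold pvRemoveDuplicates
  have hpw := pv_sorted_pairwise xs
  have hmem := PySem.List.mem_sorted xs (fun x => x) false a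
  cases hs : PySem.List.sorted xs (fun x => x) with
  | nil => rw [hs] at hmem; simpa using hmem.symm
  | cons y ys =>
    rw [hs] at hpw hmem
    rw [← hmem]
    simp only [List.mem_cons]
    rw [mem_pvGroupKeys hpw]
    constructor
    · rintro (rfl | ⟨hm, _⟩)
      · exact Or.inl rfl
      · exact Or.inr hm
    · rintro (rfl | hm)
      · exact Or.inl rfl
      · by_cases hay : a = y
        · exact Or.inl hay
        · exact Or.inr ⟨hm, hay⟩

theorem pairwise_pvRemoveDuplicates (xs : List (List String)) :
    (pvRemoveDuplicates xs).Pairwise (· < ·) := by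
  unfold pvRemoveDuplicates
  have hpw := pv_sorted_pairwise xs
  cases hs : PySem.List.sorted xs (fun x => x) with
  | nil => simp
  | cons y ys =>
    rw [hs] at hpw
    exact pairwise_pvGroupKeys hpw

theorem pvRemoveDuplicates_ext {xs ys : List (List String)} (h : ∀ a, a ∈ xs ↔ a ∈ ys) :
    pvRemoveDuplicates xs = pvRemoveDuplicates ys := by
  have p1 := pairwise_pvRemoveDuplicates xs
  have p2 := pairwise_pvRemoveDuplicates ys
  have n1 : (pvRemoveDuplicates xs).Nodup := p1.imp ne_of_lt
  have n2 : (pvRemoveDuplicates ys).Nodup := p2.imp ne_of_lt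
  have hperm : (pvRemoveDuplicates xs).Perm (pvRemoveDuplicates ys) := by
    rw [List.perm_ext_iff_of_nodup n1 n2]
    intro a
    rw [mem_pvRemoveDuplicates, mem_pvRemoveDuplicates]
    exact h a
  exact List.Perm.eq_of_pairwise
    (fun a b _ _ hab hba => le_antisymm hab.le hba.le) p1 p2 hperm

-- membership in A's recursive generator
theorem mem_pvGetPossibilitiesWithout {nt : String} (a : List String) :
    ∀ (fuel : Nat) (rule : List String), rule.length ≤ fuel →
    (a ∈ pvGetPossibilitiesWithout fuel rule nt ↔
      DelNt nt rule a ∧ a.length < rule.length ∧ a ≠ []) := by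
  intro fuel
  induction fuel with
  | zero =>
    intro rule hf
    have : rule = [] := List.length_eq_zero_iff.mp (Nat.le_zero.mp hf)
    subst this
    simp [pvGetPossibilitiesWithout]
  | succ f ih =>
    intro rule hf
    rw [pvGetPossibilitiesWithout, mem_pvRemoveDuplicates]
    have hstep : (fun (possibilities : List (List String)) index =>
        if rule.getD index "" = nt then
          let listCopy := rule.eraseIdx index
          if 1 ≤ listCopy.length then
            possibilities ++ (listCopy :: pvGetPossibilitiesWithout f listCopy nt)
          else possibilities
        else possibilities)
      = (fun acc index => acc ++
          (if rule.getD index "" = nt then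
            (if 1 ≤ (rule.eraseIdx index).length then
              (rule.eraseIdx index) :: pvGetPossibilitiesWithout f (rule.eraseIdx index) nt
            else []) else [])) := by
      funext acc index
      dsimp only []
      split_ifs <;> simp
    rw [hstep, PySem.List.foldl_append_eq_flatMap]
    simp only [List.nil_append, List.mem_flatMap, List.mem_range]
    constructor
    · rintro ⟨i, hi, hmem⟩
      by_cases hv : rule.getD i "" = nt
      case neg => rw [if_neg hv] at hmem; simp at hmem
      rw [if_pos hv] at hmem
      by_cases hlen : 1 ≤ (rule.eraseIdx i).length
      case neg => rw [if_neg hlen] at hmem; simp at hmem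
      rw [if_pos hlen] at hmem
      have hone := delnt_oneStep (nt := nt) rule i hi hv
      have hlen_erase : (rule.eraseIdx i).length = rule.length - 1 := by
        rw [List.length_eraseIdx, if_pos hi]
      rcases List.mem_cons.mp hmem with rfl | hmem
      · refine ⟨hone, by omega, ?_⟩
        intro hc
        rw [hc] at hlen
        simp at hlen
      · have hrec := (ih (rule.eraseIdx i) (by omega)).mp hmem
        exact ⟨delnt_trans hone hrec.1, by omega, hrec.2.2⟩
    · rintro ⟨hdel, hlt, hne⟩
      obtain ⟨i, hi, hv, hd⟩ := delnt_decomp hdel hlt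
      have hlen_erase : (rule.eraseIdx i).length = rule.length - 1 := by
        rw [List.length_eraseIdx, if_pos hi]
      have halen : 1 ≤ a.length := List.length_pos_iff.mpr hne
      have hsub : a.Sublist (rule.eraseIdx i) := delnt_sublist hd
      have hle : a.length ≤ (rule.eraseIdx i).length := hsub.length_le
      refine ⟨i, hi, ?_⟩
      rw [if_pos hv, if_pos (by omega)]
      by_cases heq : a.length = (rule.eraseIdx i).length
      · exact List.mem_cons.mpr (Or.inl (hsub.eq_of_length heq))
      · exact List.mem_cons.mpr (Or.inr ((ih (rule.eraseIdx i) (by omega)).mpr ⟨hd, by omega, hne⟩))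

-- membership in B's combinations-based generator (per rule)
theorem mem_B_variants {nt : String} (rule a : List String) :
    (∃ removed : Int, removed ∈ PySem.List.pyRange 1 ((PySem.List.count rule nt : Int) + 1) ∧
      1 ≤ (rule.length : Int) - removed ∧
      a ∈ (PySem.List.combinations rule ((rule.length : Int) - removed).toNat).filter
        (fun cand => (PySem.List.count cand nt : Int) == (PySem.List.count rule nt : Int) - removed))
    ↔ DelNt nt rule a ∧ a.length < rule.length ∧ a ≠ [] := by
  constructor
  · rintro ⟨removed, hr, hg, hmem⟩
    rw [PySem.List.mem_pyRange_one] at hr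
    rw [List.mem_filter] at hmem
    rcases hmem with ⟨hcomb, hcnt⟩
    rw [PySem.List.mem_combinations_iff] at hcomb
    rcases hcomb with ⟨hsub, hlen⟩
    have hcnt' : (PySem.List.count a nt : Int) = (PySem.List.count rule nt : Int) - removed :=
      beq_iff_eq.mp hcnt
    simp only [PySem.List.count_eq] at hcnt' hr
    have hL : (a.length : Int) = (rule.length : Int) - removed := by omega
    refine ⟨delnt_of_sublist_count hsub (by omega), by omega, ?_⟩
    intro hc
    rw [hc] at hL
    simp only [List.length_nil, Nat.cast_zero] at hL
    omega
  · rintro ⟨hdel, hlt, hne⟩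
    have hcnt := delnt_count hdel
    have hsub := delnt_sublist hdel
    have halen : 1 ≤ a.length := List.length_pos_iff.mpr hne
    have hcle : a.count nt ≤ rule.count nt := hsub.count_le nt
    refine ⟨(rule.length : Int) - (a.length : Int), ?_, by omega, ?_⟩
    · rw [PySem.List.mem_pyRange_one]
      simp only [PySem.List.count_eq]
      omega
    · rw [List.mem_filter]
      refine ⟨(PySem.List.mem_combinations_iff rule _ a).mpr ⟨hsub, by omega⟩, ?_⟩
      rw [beq_iff_eq]
      simp only [PySem.List.count_eq]
      omega

-- membership in A's accumulated list
theorem mem_A_fold {nt : String} (listOfRules : List (List String)) (a : List String) :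
    a ∈ (listOfRules.foldl (fun possibilities rule =>
      let possibilitiesWithout := pvGetPossibilitiesWithout rule.length rule nt
      if possibilitiesWithout ≠ [] then (possibilities ++ [rule]) ++ possibilitiesWithout
      else possibilities ++ [rule]) [])
    ↔ ∃ rule ∈ listOfRules, a = rule ∨ a ∈ pvGetPossibilitiesWithout rule.length rule nt := by
  have hstep : (fun (possibilities : List (List String)) rule =>
      let possibilitiesWithout := pvGetPossibilitiesWithout rule.length rule nt
      if possibilitiesWithout ≠ [] then (possibilities ++ [rule]) ++ possibilitiesWithout
      else possibilities ++ [rule])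
    = (fun acc rule => acc ++ (rule :: pvGetPossibilitiesWithout rule.length rule nt)) := by
    funext acc rule
    simp only []
    split_ifs with hc
    · simp
    · simp only [ne_eq, not_not] at hc
      simp [hc]
  rw [hstep, PySem.List.foldl_append_eq_flatMap]
  simp [List.mem_flatMap]

-- membership in B's accumulated list
theorem mem_B_fold {nt : String} (listOfRules : List (List String)) (a : List String) :
    a ∈ (listOfRules.foldl (fun out rule =>
      let total := PySem.List.count rule nt
      (PySem.List.pyRange 1 ((total : Int) + 1)).foldl (fun out2 removed =>
        if 1 ≤ (rule.length : Int) - removed then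
          out2 ++ (PySem.List.combinations rule ((rule.length : Int) - removed).toNat).filter
            (fun cand => (PySem.List.count cand nt : Int) == (total : Int) - removed)
        else out2) (out ++ [rule])) [])
    ↔ ∃ rule ∈ listOfRules, a = rule ∨
        (∃ removed : Int, removed ∈ PySem.List.pyRange 1 ((PySem.List.count rule nt : Int) + 1) ∧
          1 ≤ (rule.length : Int) - removed ∧
          a ∈ (PySem.List.combinations rule ((rule.length : Int) - removed).toNat).filter
            (fun cand => (PySem.List.count cand nt : Int) == (PySem.List.count rule nt : Int) - removed)) := by
  have hinner : ∀ (rule : List String) (init : List (List String)),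
      (PySem.List.pyRange 1 ((PySem.List.count rule nt : Int) + 1)).foldl (fun out2 removed =>
        if 1 ≤ (rule.length : Int) - removed then
          out2 ++ (PySem.List.combinations rule ((rule.length : Int) - removed).toNat).filter
            (fun cand => (PySem.List.count cand nt : Int) == (PySem.List.count rule nt : Int) - removed)
        else out2) init
      = init ++ (PySem.List.pyRange 1 ((PySem.List.count rule nt : Int) + 1)).flatMap
          (fun removed =>
            if 1 ≤ (rule.length : Int) - removed then
              (PySem.List.combinations rule ((rule.length : Int) - removed).toNat).filter
                (fun cand => (PySem.List.count cand nt : Int) == (PySem.List.count rule nt : Int) - removed)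
            else []) := by
    intro rule init
    rw [← PySem.List.foldl_append_eq_flatMap]
    congr 1
    funext acc removed
    split_ifs <;> simp
  have hstep : (fun (out : List (List String)) rule =>
      let total := PySem.List.count rule nt
      (PySem.List.pyRange 1 ((total : Int) + 1)).foldl (fun out2 removed =>
        if 1 ≤ (rule.length : Int) - removed then
          out2 ++ (PySem.List.combinations rule ((rule.length : Int) - removed).toNat).filter
            (fun cand => (PySem.List.count cand nt : Int) == (total : Int) - removed)
        else out2) (out ++ [rule]))
    = (fun out rule => out ++ ([rule] ++ (PySem.List.pyRange 1 ((PySem.List.count rule nt : Int) + 1)).flatMap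
          (fun removed =>
            if 1 ≤ (rule.length : Int) - removed then
              (PySem.List.combinations rule ((rule.length : Int) - removed).toNat).filter
                (fun cand => (PySem.List.count cand nt : Int) == (PySem.List.count rule nt : Int) - removed)
            else []))) := by
    funext out rule
    simp only []
    rw [hinner rule (out ++ [rule])]
    simp
  rw [hstep, PySem.List.foldl_append_eq_flatMap]
  rw [List.nil_append, List.mem_flatMap]
  constructor
  · rintro ⟨rule, hr, hm⟩
    rcases List.mem_append.mp hm with hm' | hm'
    · exact ⟨rule, hr, Or.inl (by simpa using hm')⟩
    · rcases List.mem_flatMap.mp hm' with ⟨removed, hrem, hmm⟩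
      by_cases hg : 1 ≤ (rule.length : Int) - removed
      · rw [if_pos hg] at hmm
        exact ⟨rule, hr, Or.inr ⟨removed, hrem, hg, hmm⟩⟩
      · rw [if_neg hg] at hmm
        simp at hmm
  · rintro ⟨rule, hr, hcase⟩
    refine ⟨rule, hr, List.mem_append.mpr ?_⟩
    rcases hcase with rfl | ⟨removed, hrem, hg, hmm⟩
    · exact Or.inl (by simp)
    · refine Or.inr (List.mem_flatMap.mpr ⟨removed, hrem, ?_⟩)
      rw [if_pos hg]
      exact hmm

-- ===== VERDICT (by name: the statement is the Claim_ definition above) =====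
theorem getAllPossibilitiesRemoving_spec : Claim_equal_getAllPossibilitiesRemoving := by
  intro listOfRules nonterminal _
  unfold Spec_getAllPossibilitiesRemoving
  unfold getAllPossibilitiesRemoving getAllPossibilitiesRemoving_alt
  apply pvRemoveDuplicates_ext
  intro a
  rw [mem_A_fold, mem_B_fold]
  constructor
  · rintro ⟨rule, hr, hcase⟩
    refine ⟨rule, hr, ?_⟩
    rcases hcase with rfl | hm
    · exact Or.inl rfl
    · exact Or.inr ((mem_B_variants rule a).mpr
        ((mem_pvGetPossibilitiesWithout a rule.length rule (le_refl _)).mp hm))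
  · rintro ⟨rule, hr, hcase⟩
    refine ⟨rule, hr, ?_⟩
    rcases hcase with rfl | hm
    · exact Or.inl rfl
    · exact Or.inr ((mem_pvGetPossibilitiesWithout a rule.length rule (le_refl _)).mpr
        ((mem_B_variants rule a).mp hm))
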